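-- pv_equiv track=rewrite | github.com/akash150298/PythonTest | test.py | is_valid_string
-- ===== SOURCE A (Python) =====
-- def is_valid_string(input_string):
--     # Check if the string is at least 6 characters long
--     if len(input_string) < 6:
--         return False
--
--     # Initialize counters and a flag for checking non-numerical characters
--     num_count = 0
--     prev_char_was_digit = False
--     for i in range(len(input_string)):
--         char = input_string[i]
--
--         # Check if the current character is a digit
--         if char.isdigit():
--             num_count += 1
--             # If this is not the first number, check if it's preceded by a non-digit
--             if prev_char_was_digit:
--                 return False  # Two digits in a row, which is not allowed
--             prev_char_was_digit = True
--         else: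
--             # Reset the flag if it's not a digit (i.e., non-numeric character)
--             prev_char_was_digit = False
--
--     # Check if the number of digits is between 2 and 3
--     if num_count < 2 or num_count > 3:
--         return False
--
--     return True
-- ===== SOURCE B (Python) =====
-- def is_valid_string(input_string):
--     if len(input_string) < 6:
--         return False
--     pos = [i for i, c in enumerate(input_string) if c.isdigit()]
--     if len(pos) not in (2, 3):
--         return False
--     return all(q - p > 1 for p, q in zip(pos, pos[1:]))
-- ===== Notes on version B (the rewrite author's own statement) =====
-- stated objective: alternative
-- what changed: Instead of a stateful flag scan, B extracts the list of digit positions (enumerate + filter) and validates the count by the length of that list and the no-adjacent-digits rule as a minimum-gap (>1) condition between consecutive positions.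
import Mathlib
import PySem

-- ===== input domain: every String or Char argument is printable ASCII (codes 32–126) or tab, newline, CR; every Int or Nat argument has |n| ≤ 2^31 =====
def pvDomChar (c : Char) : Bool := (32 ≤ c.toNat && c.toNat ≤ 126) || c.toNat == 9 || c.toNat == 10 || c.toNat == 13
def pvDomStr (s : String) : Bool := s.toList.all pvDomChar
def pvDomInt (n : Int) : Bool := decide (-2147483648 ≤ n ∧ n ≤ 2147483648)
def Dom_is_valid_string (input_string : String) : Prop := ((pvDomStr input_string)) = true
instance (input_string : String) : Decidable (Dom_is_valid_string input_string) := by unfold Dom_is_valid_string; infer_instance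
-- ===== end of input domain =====

-- B replaces A's stateful flag scan by extracting the digit-position list and checking its length and the gaps between consecutive positions (alternative decomposition, same cost).


-- ===== PORT A =====
-- A's for-loop with state (num_count, prev_char_was_digit) and early return on
-- adjacent digits; on normal loop exit the trailing 2..3 count check applies.
def isvA_loop : List Char → Bool → Int → Bool
  | [], _, count => decide (2 ≤ count ∧ count ≤ 3)
  | c :: cs, prev, count =>
    if PySem.Chars.isdigit c then
      if prev then false else isvA_loop cs true (count + 1)
    else
      isvA_loop cs false count

def is_valid_string (input_string : String) : Bool :=
  if PySem.Str.len input_string < 6 then false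
  else isvA_loop input_string.toList false 0

-- ===== PORT B =====
-- pos = [i for i, c in enumerate(input_string) if c.isdigit()]
-- then length check, then all consecutive gaps > 1 via zip(pos, pos[1:]).
def is_valid_string_alt (input_string : String) : Bool :=
  if PySem.Str.len input_string < 6 then false
  else
    let pos : List Int :=
      ((PySem.List.enumerate input_string.toList 0).filter
        (fun p => PySem.Chars.isdigit p.2)).map (fun p => p.1)
    if !(pos.length == 2 || pos.length == 3) then false
    else (pos.zip pos.tail).all (fun pq => decide (pq.2 - pq.1 > 1))

-- ===== PRECONDITION & SPEC =====
def Spec_is_valid_string (input_string : String) (out : Bool) : Prop := out = is_valid_string_alt input_string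
instance (input_string : String) (out : Bool) : Decidable (Spec_is_valid_string input_string out) := by unfold Spec_is_valid_string; infer_instance

-- ===== CLAIM (what is proved, stated in full; the proofs are below) =====
def Claim_equal_is_valid_string : Prop := ∀ (input_string : String), Dom_is_valid_string input_string → Spec_is_valid_string input_string (is_valid_string input_string)

-- ===== LEMMAS AND PROOFS =====

-- adjacency predicate on the digit mask (characterises A's early return)
def pvAdj : List Bool → Bool
  | a :: b :: t => (a && b) || pvAdj (b :: t)
  | _ => false

-- digit count of the mask as an Int (A's num_count)
def pvCnt : List Bool → Int
  | [] => 0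
  | b :: m => (if b then 1 else 0) + pvCnt m

-- positions of `true` in a mask (B's pos list, relative indices)
def pvPos : List Bool → List Int
  | [] => []
  | b :: m => if b then 0 :: (pvPos m).map (· + 1) else (pvPos m).map (· + 1)

-- B's recursive gap check
def pvGap : List Int → Bool
  | a :: b :: t => decide (b - a > 1) && pvGap (b :: t)
  | _ => true

theorem isvA_loop_eq (cs : List Char) : ∀ (prev : Bool) (count : Int),
    isvA_loop cs prev count =
      (!pvAdj (prev :: cs.map PySem.Chars.isdigit) &&
        decide (2 ≤ count + pvCnt (cs.map PySem.Chars.isdigit) ∧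
                count + pvCnt (cs.map PySem.Chars.isdigit) ≤ 3)) := by
  induction cs with
  | nil => intro prev count; simp [isvA_loop, pvAdj, pvCnt]
  | cons c cs ih =>
    intro prev count
    cases h : PySem.Chars.isdigit c with
    | true =>
      cases prev with
      | true => simp [isvA_loop, h, pvAdj]
      | false =>
        simp only [isvA_loop, h, ih, List.map_cons, pvAdj, pvCnt,
          Bool.false_and, Bool.false_or, if_true, Bool.false_eq_true, if_false]
        congr 1
        rw [decide_eq_decide]
        omega
    | false =>
      simp only [isvA_loop, h, ih, List.map_cons, pvAdj, pvCnt,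
        Bool.and_false, Bool.false_or, Bool.false_eq_true, if_false]
      congr 1
      rw [decide_eq_decide]
      omega

theorem pvAdj_false_cons (m : List Bool) : pvAdj (false :: m) = pvAdj m := by
  cases m <;> simp [pvAdj]

theorem pvGap_map_add_one (ps : List Int) : pvGap (ps.map (· + 1)) = pvGap ps := by
  induction ps with
  | nil => rfl
  | cons a t ih =>
    cases t with
    | nil => rfl
    | cons b t' =>
      simp only [List.map_cons] at ih ⊢
      simp only [pvGap, ih]
      congr 1
      rw [decide_eq_decide]
      omega

-- the zip-with-tail form in B's port equals the recursive gap check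
theorem pvGap_zip (ps : List Int) :
    ((ps.zip ps.tail).all (fun pq => decide (pq.2 - pq.1 > 1))) = pvGap ps := by
  induction ps with
  | nil => rfl
  | cons a t ih =>
    cases t with
    | nil => rfl
    | cons b t' => simp [pvGap, ← ih, List.zip]

theorem pvPos_nonneg (m : List Bool) : ∀ x ∈ pvPos m, 0 ≤ x := by
  induction m with
  | nil => simp [pvPos]
  | cons b t ih =>
    intro x hx
    cases b <;> simp [pvPos] at hx
    · obtain ⟨y, hy, rfl⟩ := hx
      have := ih y hy; omega
    · rcases hx with rfl | ⟨y, hy, rfl⟩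
      · omega
      · have := ih y hy; omega

theorem pvGap_zero_cons_map2 (ps : List Int) (h0 : ∀ x ∈ ps, 0 ≤ x) :
    pvGap (0 :: ((ps.map (· + 1)).map (· + 1))) = pvGap ps := by
  cases ps with
  | nil => rfl
  | cons p ps' =>
    have hp0 : (0 : Int) ≤ p := h0 p (List.mem_cons_self ..)
    have h2 : pvGap (((p :: ps').map (· + 1)).map (· + 1)) = pvGap (p :: ps') := by
      rw [pvGap_map_add_one, pvGap_map_add_one]
    simp only [List.map_cons] at h2
    simp only [List.map_cons, pvGap, h2]
    have hd : decide ((p : Int) + 1 + 1 - 0 > 1) = true := by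
      rw [decide_eq_true_eq]; omega
    rw [hd, Bool.true_and]

-- gap condition on the position list ↔ no adjacent trues in the mask
theorem pvGap_pvPos (m : List Bool) : pvGap (pvPos m) = !pvAdj m := by
  induction m with
  | nil => rfl
  | cons b m ih =>
    cases m with
    | nil => cases b <;> rfl
    | cons c t =>
      cases b with
      | false =>
        have hp : pvPos (false :: c :: t) = (pvPos (c :: t)).map (· + 1) := by
          simp [pvPos]
        rw [hp, pvGap_map_add_one, ih, pvAdj_false_cons]
      | true =>
        cases c with
        | true =>
          simp [pvPos, pvGap, pvAdj]
        | false =>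
          have hp : pvPos (true :: false :: t)
              = 0 :: (((pvPos t).map (· + 1)).map (· + 1)) := by
            simp [pvPos]
          rw [hp, pvGap_zero_cons_map2 _ (pvPos_nonneg t)]
          have ih' : pvGap ((pvPos t).map (· + 1)) = !pvAdj (false :: t) := by
            simpa [pvPos] using ih
          rw [pvGap_map_add_one, pvAdj_false_cons] at ih'
          simp [pvAdj, pvAdj_false_cons, ih']

theorem pvCnt_length (m : List Bool) : pvCnt m = ((pvPos m).length : Int) := by
  induction m with
  | nil => rfl
  | cons b t ih => cases b <;> simp [pvCnt, pvPos, ih] <;> omega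

-- B's enumerate/filter/map computation equals pvPos of the digit mask shifted by the start
theorem enum_filter_pos (cs : List Char) : ∀ (s : Int),
    ((PySem.List.enumerate cs s).filter (fun p => PySem.Chars.isdigit p.2)).map
        (fun p => p.1)
      = (pvPos (cs.map PySem.Chars.isdigit)).map (· + s) := by
  induction cs with
  | nil => intro s; simp [PySem.List.enumerate_nil, pvPos]
  | cons c cs ih =>
    intro s
    rw [PySem.List.enumerate_cons]
    cases h : PySem.Chars.isdigit c with
    | true =>
      simp only [List.filter_cons, h, if_true, List.map_cons, pvPos, ih (s + 1),
        List.map_map]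
      congr 1
      · omega
      · apply List.map_congr_left; intro x _; simp [Function.comp]; omega
    | false =>
      simp only [List.filter_cons, h, Bool.false_eq_true, if_false, List.map_cons,
        pvPos, ih (s + 1), List.map_map]
      apply List.map_congr_left; intro x _; simp [Function.comp]; omega

-- ===== VERDICT (by name: the statement is the Claim_ definition above) =====
theorem is_valid_string_spec : Claim_equal_is_valid_string := by
  intro s _
  unfold Spec_is_valid_string is_valid_string is_valid_string_alt
  by_cases h : PySem.Str.len s < 6
  · rw [if_pos h, if_pos h]
  · rw [if_neg h, if_neg h]
    rw [isvA_loop_eq, pvAdj_false_cons]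
    have hpos : ((PySem.List.enumerate s.toList 0).filter
        (fun p => PySem.Chars.isdigit p.2)).map (fun p => p.1)
        = pvPos (s.toList.map PySem.Chars.isdigit) := by
      rw [enum_filter_pos s.toList 0]
      simp
    simp only [hpos, pvGap_zip, pvGap_pvPos, pvCnt_length]
    set m := s.toList.map PySem.Chars.isdigit
    set n := (pvPos m).length
    by_cases hn : n = 2 ∨ n = 3
    · have hlen : ((n == 2 || n == 3) : Bool) = true := by
        rcases hn with h' | h' <;> simp [h']
      have hcnt : decide (2 ≤ (0 : Int) + (n : Int) ∧ (0 : Int) + (n : Int) ≤ 3) = true := by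
        rw [decide_eq_true_eq]; omega
      rw [hcnt, Bool.and_true, hlen]
      simp
    · have hlen : ((n == 2 || n == 3) : Bool) = false := by
        simp only [Bool.or_eq_false_iff, beq_eq_false_iff_ne]; omega
      have hcnt : decide (2 ≤ (0 : Int) + (n : Int) ∧ (0 : Int) + (n : Int) ≤ 3) = false := by
        rw [decide_eq_false_iff_not]; omega
      rw [hcnt, Bool.and_false, hlen]
      simp
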